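-- pv_equiv track=rewrite | github.com/weikunhan/leetcode-summary-python | python_practice/amazon/substrings_of_size_k_with_k_distinct_chars.py | substrings_of_size_k_with_k_distinct_chars
-- ===== SOURCE A (Python) =====
-- def substrings_of_size_k_with_k_distinct_chars(s, k):
--     """
--     :type s: List[string]
--     :type k: int
--     :rtype: int
--     """
--
--     value_dict = set()
--     right = 0
--     left = 0
--     res = set()
--
--     while right < len(s) and left < len(s):
--         if not s[right] in value_dict:
--             value_dict.add(s[right])
--             right += 1
--
--             if right - left == k:
--                 res.add(s[left:right])
--                 value_dict.remove(s[left])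
--                 left += 1
--         else:
--             value_dict.remove(s[left])
--             left += 1
--
--     res = list(res)
--
--     return res
-- ===== SOURCE B (Python) =====
-- def substrings_of_size_k_with_k_distinct_chars(s, k):
--     if k <= 0:
--         return []
--     res = set()
--     for i in range(len(s) - k + 1):
--         sub = s[i:i + k]
--         if len(set(sub)) == k:
--             res.add(sub)
--     return list(res)
-- ===== Notes on version B (the rewrite author's own statement) =====
-- stated objective: simpler
-- what changed: Replaces the stateful two-pointer sliding window (rolling character set, interleaved left/right advances) with a direct scan that tests each length-k window independently via len(set(window)) == k.
import Mathlib
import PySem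

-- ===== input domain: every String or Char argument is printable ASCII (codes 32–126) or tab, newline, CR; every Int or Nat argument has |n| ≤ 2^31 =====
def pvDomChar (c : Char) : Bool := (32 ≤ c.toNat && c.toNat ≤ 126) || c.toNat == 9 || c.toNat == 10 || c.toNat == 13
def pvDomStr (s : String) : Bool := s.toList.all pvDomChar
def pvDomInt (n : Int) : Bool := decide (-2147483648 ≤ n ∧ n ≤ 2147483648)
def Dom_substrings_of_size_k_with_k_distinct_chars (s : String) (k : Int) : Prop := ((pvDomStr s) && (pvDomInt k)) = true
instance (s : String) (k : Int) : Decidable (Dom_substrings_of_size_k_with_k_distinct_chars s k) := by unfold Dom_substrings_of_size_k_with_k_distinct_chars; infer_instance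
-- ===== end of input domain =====

-- B replaces A's stateful two-pointer sliding window with a direct per-window scan
-- (each length-k window tested independently via len(set(window)) == k); objective: simpler.


-- ===== PORT A =====
-- The while-loop of A; `right`/`left` are kept as Nat since in A they start at 0 and only
-- ever increase.  Python's `value_dict.remove(x)` is ported as `Set.discard`: at every
-- point A calls `.remove`, the element is a member (it is a char of the current window),
-- so remove never raises and equals discard.
def pvLoopA (cs : List Char) (k : Int) (vd : PySem.Set Char) (right left : Nat)
    (res : PySem.Set String) : PySem.Set String :=
  if h : right < cs.length ∧ left < cs.length then
    if !(PySem.Set.contains vd (cs[right]'h.1)) then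
      -- value_dict.add(s[right]); right += 1
      if ((right : Int) + 1) - (left : Int) = k then
        -- res.add(s[left:right]); value_dict.remove(s[left]); left += 1
        pvLoopA cs k (PySem.Set.discard (PySem.Set.add vd (cs[right]'h.1)) (cs[left]'h.2))
          (right + 1) (left + 1)
          (PySem.Set.add res (String.mk (PySem.List.slice cs (some (left : Int)) (some ((right : Int) + 1)))))
      else
        pvLoopA cs k (PySem.Set.add vd (cs[right]'h.1)) (right + 1) left res
    else
      -- value_dict.remove(s[left]); left += 1
      pvLoopA cs k (PySem.Set.discard vd (cs[left]'h.2)) right (left + 1) res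
  else
    res
termination_by (cs.length - right) + (cs.length - left)
decreasing_by all_goals omega

def substrings_of_size_k_with_k_distinct_chars (s : String) (k : Int) : List String :=
  pvLoopA s.toList k PySem.Set.empty 0 0 PySem.Set.empty

-- ===== PORT B =====
def substrings_of_size_k_with_k_distinct_chars_alt (s : String) (k : Int) : List String :=
  if k ≤ 0 then []
  else
    (PySem.List.pyRange 0 ((s.toList.length : Int) - k + 1) 1).foldl
      (fun res i =>
        let sub := PySem.List.slice s.toList (some i) (some (i + k))
        if PySem.Set.len (PySem.Set.ofList sub) = k then PySem.Set.add res (String.mk sub)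
        else res)
      PySem.Set.empty

-- ===== PRECONDITION & SPEC =====
def Spec_substrings_of_size_k_with_k_distinct_chars (s : String) (k : Int) (out : List String) : Prop := out = substrings_of_size_k_with_k_distinct_chars_alt s k
instance (s : String) (k : Int) (out : List String) : Decidable (Spec_substrings_of_size_k_with_k_distinct_chars s k out) := by unfold Spec_substrings_of_size_k_with_k_distinct_chars; infer_instance

-- ===== CLAIM (what is proved, stated in full; the proofs are below) =====
def Claim_equal_substrings_of_size_k_with_k_distinct_chars : Prop := ∀ (s : String) (k : Int), Dom_substrings_of_size_k_with_k_distinct_chars s k → Spec_substrings_of_size_k_with_k_distinct_chars s k (substrings_of_size_k_with_k_distinct_chars s k)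

-- ===== LEMMAS AND PROOFS =====

-- The window of length k starting at i.
def pvWin (cs : List Char) (k : Int) (i : Nat) : List Char := (cs.drop i).take k.toNat

-- B's accumulator after the first m windows (indices 0..m-1).
def pvP (cs : List Char) (k : Int) (m : Nat) : PySem.Set String :=
  (List.range m).foldl
    (fun r i =>
      if PySem.Set.len (PySem.Set.ofList (pvWin cs k i)) = k then
        PySem.Set.add r (String.mk (pvWin cs k i))
      else r)
    PySem.Set.empty

theorem pvP_succ (cs : List Char) (k : Int) (m : Nat) :
    pvP cs k (m + 1) =
      if PySem.Set.len (PySem.Set.ofList (pvWin cs k m)) = k then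
        PySem.Set.add (pvP cs k m) (String.mk (pvWin cs k m))
      else pvP cs k m := by
  simp [pvP, List.range_succ]

theorem pvP_stable (cs : List Char) (k : Int) (a b : Nat) (hab : a ≤ b)
    (hfail : ∀ i, a ≤ i → i < b → PySem.Set.len (PySem.Set.ofList (pvWin cs k i)) ≠ k) :
    pvP cs k b = pvP cs k a := by
  induction b with
  | zero =>
    have ha : a = 0 := by omega
    rw [ha]
  | succ b ih =>
    rcases Nat.lt_or_ge a (b + 1) with h | h
    · have hb : a ≤ b := by omega
      rw [pvP_succ, if_neg (hfail b hb (by omega)), ih hb (fun i h1 h2 => hfail i h1 (by omega))]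
    · have : a = b + 1 := by omega
      rw [this]

theorem pv_len_ofList_lt {α : Type} [BEq α] [LawfulBEq α] (w : List α) (h : ¬ w.Nodup) :
    (PySem.Set.ofList w).length < w.length := by
  induction w with
  | nil => simp at h
  | cons x xs ih =>
    rw [PySem.Set.ofList_cons]
    by_cases hx : x ∈ xs
    · have hmem : x ∈ PySem.Set.ofList xs := (PySem.Set.mem_ofList _ _).2 hx
      have hlt : ((PySem.Set.ofList xs).discard x).length < (PySem.Set.ofList xs).length := by
        have := List.length_filter_lt_length_iff_exists
          (l := PySem.Set.ofList xs) (p := fun y => !y == x)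
        simp only [PySem.Set.discard]
        exact this.2 ⟨x, hmem, by simp⟩
      have hle := PySem.Set.length_ofList_le xs
      simp only [List.length_cons]
      omega
    · have hxs : ¬ xs.Nodup := by
        intro hnd; exact h (List.nodup_cons.2 ⟨hx, hnd⟩)
      have hlt := ih hxs
      have hle : ((PySem.Set.ofList xs).discard x).length ≤ (PySem.Set.ofList xs).length := by
        simp only [PySem.Set.discard]; exact List.length_filter_le _ _
      simp only [List.length_cons]
      omega

-- a failing check: window sticking out past the end
theorem pv_check_short (cs : List Char) (k : Int) (i : Nat) (hk : 0 < k)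
    (h : cs.length < i + k.toNat) :
    PySem.Set.len (PySem.Set.ofList (pvWin cs k i)) ≠ k := by
  have hlen : (pvWin cs k i).length < k.toNat := by
    simp only [pvWin, List.length_take, List.length_drop]; omega
  have := PySem.Set.length_ofList_le (pvWin cs k i)
  simp only [PySem.Set.len]
  omega

-- a failing check: window with a repeated character
theorem pv_check_dup (cs : List Char) (k : Int) (i : Nat) (hk : 0 < k)
    (h : ¬ (pvWin cs k i).Nodup) :
    PySem.Set.len (PySem.Set.ofList (pvWin cs k i)) ≠ k := by
  have h1 := pv_len_ofList_lt _ h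
  have h2 : (pvWin cs k i).length ≤ k.toNat := by
    simp only [pvWin, List.length_take, List.length_drop]; omega
  simp only [PySem.Set.len]
  omega

-- the window decomposition cs[l:r+1] = cs[l:r] ++ [cs[r]]
theorem pv_wnd_snoc (cs : List Char) (r l : Nat) (hlr : l ≤ r) (hr : r < cs.length) :
    (cs.drop l).take (r + 1 - l) = (cs.drop l).take (r - l) ++ [cs[r]'hr] := by
  have h1 : r + 1 - l = (r - l) + 1 := by omega
  rw [h1, List.take_add_one]
  have h2 : (cs.drop l)[r - l]? = some (cs[r]'hr) := by
    rw [List.getElem?_drop]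
    have : l + (r - l) = r := by omega
    rw [this, List.getElem?_eq_getElem hr]
  rw [h2]
  rfl

-- the window decomposition cs[l:r] = cs[l] :: cs[l+1:r]
theorem pv_wnd_cons (cs : List Char) (r l : Nat) (hlr : l < r) (hl : l < cs.length) :
    (cs.drop l).take (r - l) = cs[l]'hl :: (cs.drop (l + 1)).take (r - (l + 1)) := by
  have h1 : cs.drop l = cs[l]'hl :: cs.drop (l + 1) := by
    rw [List.drop_eq_getElem_cons hl]
  rw [h1]
  have h2 : r - l = (r - (l + 1)) + 1 := by omega
  rw [h2, List.take_succ_cons]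

theorem pv_discard_cons {α : Type} [BEq α] [LawfulBEq α] (x : α) (t : List α) (hx : x ∉ t) :
    PySem.Set.discard (x :: t) x = t := by
  show List.filter (fun y => !(y == x)) (x :: t) = t
  rw [List.filter_cons, if_neg (by simp)]
  exact List.filter_eq_self.2 (fun a ha => by
    simp only [Bool.not_eq_eq_eq_not, Bool.not_true, beq_eq_false_iff_ne, ne_eq]
    exact fun h => hx (h ▸ ha))

-- main invariant of A's loop (k ≥ 1): starting from a distinct window cs[l:r] with
-- value_dict = that window and res = B's accumulator over windows 0..l-1, the loop
-- returns B's full accumulator.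
theorem pvLoopA_inv (cs : List Char) (k : Int) (hk : 0 < k) :
    ∀ (m r l : Nat) (vd : PySem.Set Char) (res : PySem.Set String),
      (cs.length - r) + (cs.length - l) ≤ m →
      l ≤ r → r ≤ cs.length → ((r : Int) - (l : Int) < k) →
      ((cs.drop l).take (r - l)).Nodup →
      vd = (cs.drop l).take (r - l) →
      res = pvP cs k l →
      pvLoopA cs k vd r l res = pvP cs k (cs.length + 1 - k.toNat) := by
  intro m
  induction m with
  | zero =>
    intro r l vd res hm hlr hr hwk hnd hvd hres
    have hrl : r = cs.length ∧ l = cs.length := by omega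
    rw [pvLoopA, dif_neg (by omega)]
    rw [hres, hrl.2]
    exact pvP_stable cs k (cs.length + 1 - k.toNat) cs.length (by omega)
      (fun i h1 h2 => pv_check_short cs k i hk (by omega))
  | succ m ih =>
    intro r l vd res hm hlr hr hwk hnd hvd hres
    by_cases hcond : r < cs.length ∧ l < cs.length
    · rw [pvLoopA, dif_pos hcond]
      by_cases hmem : cs[r]'hcond.1 ∈ vd
      · -- duplicate: shrink from the left
        rw [if_neg (by simp [hmem])]
        -- l < r since the window is nonempty
        have hlr' : l < r := by
          rcases Nat.lt_or_ge l r with h | h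
          · exact h
          · exfalso
            have : r - l = 0 := by omega
            rw [hvd, this] at hmem
            simp at hmem
        -- window at l is not distinct: it contains cs[r] twice
        have hfail : PySem.Set.len (PySem.Set.ofList (pvWin cs k l)) ≠ k := by
          apply pv_check_dup cs k l hk
          intro hnodup
          -- prefix of pvWin of length r+1-l is wnd ++ [cs[r]], which has a duplicate
          have hpre : (pvWin cs k l).take (r + 1 - l) = (cs.drop l).take (r + 1 - l) := by
            simp only [pvWin, List.take_take]
            congr 1
            omega
          have hsnoc := pv_wnd_snoc cs r l hlr hcond.1
          have hnd2 : ((cs.drop l).take (r - l) ++ [cs[r]'hcond.1]).Nodup := by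
            rw [← hsnoc, ← hpre]
            exact hnodup.sublist (List.take_sublist _ _)
          have : cs[r]'hcond.1 ∉ (cs.drop l).take (r - l) := by
            have hd := (List.nodup_append.1 hnd2).2.2
            intro hin
            exact hd _ hin _ (by simp) rfl
          rw [hvd] at hmem
          exact this hmem
        apply ih r (l + 1) _ _ (by omega) (by omega) hr (by push_cast; omega)
        · have := pv_wnd_cons cs r l hlr' hcond.2
          rw [this] at hnd
          exact (List.nodup_cons.1 hnd).2
        · have hc := pv_wnd_cons cs r l hlr' hcond.2
          rw [hvd, hc]
          apply pv_discard_cons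
          rw [hc] at hnd
          exact (List.nodup_cons.1 hnd).1
        · rw [hres, pvP_succ, if_neg hfail]
      · rw [if_pos (by simp [hmem])]
        have hsnoc := pv_wnd_snoc cs r l hlr hcond.1
        have hadd : PySem.Set.add vd (cs[r]'hcond.1) = (cs.drop l).take (r + 1 - l) := by
          rw [PySem.Set.add_of_not_mem hmem, hvd, hsnoc]
        have hnd' : ((cs.drop l).take (r + 1 - l)).Nodup := by
          rw [hsnoc]
          rw [List.nodup_append]
          refine ⟨hnd, List.nodup_singleton _, ?_⟩
          intro a ha b hb
          simp only [List.mem_singleton] at hb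
          subst hb
          intro hab
          exact hmem (by rw [hvd]; exact hab ▸ ha)
        by_cases hrec : ((r : Int) + 1) - (l : Int) = k
        · -- record the window and shrink
          rw [if_pos hrec]
          have hkl : r + 1 - l = k.toNat := by omega
          have hwin : pvWin cs k l = (cs.drop l).take (r + 1 - l) := by
            simp only [pvWin]
            congr 1
            omega
          have hlen : (pvWin cs k l).length = k.toNat := by
            rw [hwin]
            simp only [List.length_take, List.length_drop]
            omega
          have hcheck : PySem.Set.len (PySem.Set.ofList (pvWin cs k l)) = k := by
            rw [PySem.Set.ofList_eq_self_of_nodup _ (hwin ▸ hnd')]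
            simp only [PySem.Set.len, hlen]
            omega
          have hslice : PySem.List.slice cs (some (l : Int)) (some ((r : Int) + 1)) =
              pvWin cs k l := by
            have h1 : ((r : Int) + 1) = (l : Int) + ((r + 1 - l : Nat) : Int) := by
              omega
            rw [h1, PySem.List.slice_natCast_add, hwin]
          apply ih (r + 1) (l + 1) _ _ (by omega) (by omega) (by omega)
            (by push_cast at hrec ⊢; omega)
          · have hc := pv_wnd_cons cs (r + 1) l (by omega) hcond.2
            rw [hc] at hnd'
            exact (List.nodup_cons.1 hnd').2
          · have hc := pv_wnd_cons cs (r + 1) l (by omega) hcond.2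
            rw [hadd, hc]
            apply pv_discard_cons
            rw [hc] at hnd'
            exact (List.nodup_cons.1 hnd').1
          · rw [hres, pvP_succ, if_pos hcheck, hslice]
        · -- just grow the window
          rw [if_neg hrec]
          apply ih (r + 1) l _ _ (by omega) (by omega) (by omega)
            (by push_cast at hrec ⊢; omega) hnd' hadd hres
    · rw [pvLoopA, dif_neg hcond]
      have hreq : r = cs.length := by omega
      rw [hres]
      have hl : cs.length + 1 - k.toNat ≤ l := by
        have : (r : Int) - (l : Int) < k := hwk
        omega
      exact pvP_stable cs k (cs.length + 1 - k.toNat) l hl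
        (fun i h1 h2 => pv_check_short cs k i hk (by omega))

-- for k ≤ 0 the recording branch of A never fires, so the loop returns res unchanged
theorem pvLoopA_nonpos (cs : List Char) (k : Int) (hk : k ≤ 0) :
    ∀ (m r l : Nat) (vd : PySem.Set Char) (res : PySem.Set String),
      (cs.length - r) + (cs.length - l) ≤ m →
      l ≤ r → r ≤ cs.length →
      ((cs.drop l).take (r - l)).Nodup →
      vd = (cs.drop l).take (r - l) →
      pvLoopA cs k vd r l res = res := by
  intro m
  induction m with
  | zero =>
    intro r l vd res hm hlr hr hnd hvd
    rw [pvLoopA, dif_neg (by omega)]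
  | succ m ih =>
    intro r l vd res hm hlr hr hnd hvd
    by_cases hcond : r < cs.length ∧ l < cs.length
    · rw [pvLoopA, dif_pos hcond]
      by_cases hmem : cs[r]'hcond.1 ∈ vd
      · rw [if_neg (by simp [hmem])]
        have hlr' : l < r := by
          rcases Nat.lt_or_ge l r with h | h
          · exact h
          · exfalso
            have : r - l = 0 := by omega
            rw [hvd, this] at hmem
            simp at hmem
        have hc := pv_wnd_cons cs r l hlr' hcond.2
        apply ih r (l + 1) _ _ (by omega) (by omega) hr
        · rw [hc] at hnd
          exact (List.nodup_cons.1 hnd).2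
        · rw [hvd, hc]
          apply pv_discard_cons
          rw [hc] at hnd
          exact (List.nodup_cons.1 hnd).1
      · rw [if_pos (by simp [hmem])]
        rw [if_neg (by omega)]
        have hsnoc := pv_wnd_snoc cs r l hlr hcond.1
        apply ih (r + 1) l _ _ (by omega) (by omega) (by omega)
        · rw [hsnoc, List.nodup_append]
          refine ⟨hnd, List.nodup_singleton _, ?_⟩
          intro a ha b hb
          simp only [List.mem_singleton] at hb
          subst hb
          intro hab
          exact hmem (by rw [hvd]; exact hab ▸ ha)
        · rw [PySem.Set.add_of_not_mem hmem, hvd, hsnoc]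
    · rw [pvLoopA, dif_neg hcond]

-- B unfolded (k ≥ 1): B's fold over range(n-k+1) is pvP at n+1-k
theorem pv_alt_eq (s : String) (k : Int) (hk : 0 < k) :
    substrings_of_size_k_with_k_distinct_chars_alt s k =
      pvP s.toList k (s.toList.length + 1 - k.toNat) := by
  unfold substrings_of_size_k_with_k_distinct_chars_alt
  rw [if_neg (by omega)]
  have hrange : PySem.List.pyRange 0 ((s.toList.length : Int) - k + 1) 1 =
      (List.range (s.toList.length + 1 - k.toNat)).map (Nat.cast : ℕ → ℤ) := by
    by_cases h : (0 : Int) < (s.toList.length : Int) - k + 1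
    · have h2 : (s.toList.length : Int) - k + 1 = ((s.toList.length + 1 - k.toNat : Nat) : Int) := by
        omega
      rw [h2, PySem.List.pyRange_zero_natCast]
    · have h2 : s.toList.length + 1 - k.toNat = 0 := by omega
      rw [h2, List.range_zero, List.map_nil]
      simp only [PySem.List.pyRange]
      rw [if_neg (by omega), if_pos (by omega : (0:Int) < 1), if_neg (by omega)]
      simp
  rw [hrange, List.foldl_map]
  unfold pvP
  apply List.foldl_ext
  intro acc j _
  have h1 : (j : Int) + k = (j : Int) + ((k.toNat : Nat) : Int) := by omega
  simp only [h1, PySem.List.slice_natCast_add]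
  rfl

-- ===== VERDICT (by name: the statement is the Claim_ definition above) =====
theorem substrings_of_size_k_with_k_distinct_chars_spec : Claim_equal_substrings_of_size_k_with_k_distinct_chars := by
  intro s k _
  unfold Spec_substrings_of_size_k_with_k_distinct_chars
  unfold substrings_of_size_k_with_k_distinct_chars
  by_cases hk : k ≤ 0
  · have h0 := pvLoopA_nonpos s.toList k hk (2 * s.toList.length) 0 0
      PySem.Set.empty PySem.Set.empty (by omega) (by omega) (by omega) (by simp) rfl
    rw [h0]
    unfold substrings_of_size_k_with_k_distinct_chars_alt
    rw [if_pos hk]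
    rfl
  · have h1 := pvLoopA_inv s.toList k (by omega) (2 * s.toList.length) 0 0
      PySem.Set.empty PySem.Set.empty (by omega) (by omega) (by omega)
      (by omega) (by simp) rfl rfl
    rw [h1]
    exact (pv_alt_eq s k (by omega)).symm
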